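-- pv_equiv track=rewrite | github.com/miliar/Code_Jam_Webscraper | solutions_python/solutions_year15_round0_nr1/3773.py | min_friends
-- ===== SOURCE A (Python) =====
-- def min_friends(persons):
--     """Find minimum number of friends
--
--     Each element of `people` gives the number of people in the
--     audience with shyness level i, where i is the index of the
--     element with 0 <= i < k, where k is the maximum shyness
--     level.
--
--     Find the minimum number of people needed to have everyone in
--     the audience stand up.
--     """
--     count = 0
--     friends = 0
--     for i, p in enumerate(persons):
--         m = 0
--         if p > 0:
--             m = max(i - count, 0)
--         count += p + m
--         friends += m
--
--
--     return friends
-- ===== SOURCE B (Python) =====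
-- def min_friends(persons):
--     """Find minimum number of friends
--
--     Two-phase form: build the friend-free prefix-sum table, then
--     take the maximum deficit i - prefix[i] over levels that have
--     people, clamped at 0.
--     """
--     prefix = [0]
--     for p in persons:
--         prefix.append(prefix[-1] + p)
--     best = 0
--     for i, p in enumerate(persons):
--         if p > 0 and i - prefix[i] > best:
--             best = i - prefix[i]
--     return best
-- ===== Notes on version B (the rewrite author's own statement) =====
-- stated objective: alternative
-- what changed: Replaces A's single stateful loop that interleaves friend-hiring into the running count with a two-phase pass: a friend-free prefix-sum table, then a max-reduction of the deficits i - prefix[i] over occupied levels, clamped at 0.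
import Mathlib
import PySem

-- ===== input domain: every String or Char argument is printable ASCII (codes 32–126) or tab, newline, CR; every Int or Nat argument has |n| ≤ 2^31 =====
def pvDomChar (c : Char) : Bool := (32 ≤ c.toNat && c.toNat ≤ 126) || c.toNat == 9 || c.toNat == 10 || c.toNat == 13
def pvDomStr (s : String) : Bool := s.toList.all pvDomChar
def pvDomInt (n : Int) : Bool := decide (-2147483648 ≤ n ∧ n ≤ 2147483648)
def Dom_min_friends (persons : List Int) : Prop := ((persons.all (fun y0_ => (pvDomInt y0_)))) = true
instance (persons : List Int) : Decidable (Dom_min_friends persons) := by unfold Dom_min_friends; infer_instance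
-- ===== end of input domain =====

-- B rewrites A's single accumulator loop as a prefix-sum table plus a max-reduction of deficits (alternative decomposition, same cost).

-- ===== PORT A =====
def min_friends (persons : List Int) : Int :=
  ((PySem.List.enumerate persons 0).foldl
    (fun (st : Int × Int) ip =>
      let m : Int := if ip.2 > 0 then max (ip.1 - st.1) 0 else 0
      (st.1 + ip.2 + m, st.2 + m))
    (0, 0)).2

-- ===== PORT B =====
-- prefix[-1] is PySem.List.pyGetD _ (-1); here the list is never empty so getLastD is exact
def buildPrefix (pr : List Int) (xs : List Int) : List Int :=
  xs.foldl (fun pr p => pr ++ [pr.getLastD 0 + p]) pr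

def min_friends_alt (persons : List Int) : Int :=
  let pref := buildPrefix [0] persons
  (PySem.List.enumerate persons 0).foldl
    (fun best ip =>
      if ip.2 > 0 ∧ ip.1 - PySem.List.pyGetD pref ip.1 0 > best
      then ip.1 - PySem.List.pyGetD pref ip.1 0 else best)
    0

-- ===== PRECONDITION & SPEC =====
def Spec_min_friends (persons : List Int) (out : Int) : Prop := out = min_friends_alt persons
instance (persons : List Int) (out : Int) : Decidable (Spec_min_friends persons out) := by unfold Spec_min_friends; infer_instance

-- ===== CLAIM (what is proved, stated in full; the proofs are below) =====
def Claim_equal_min_friends : Prop := ∀ (persons : List Int), Dom_min_friends persons → Spec_min_friends persons (min_friends persons)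

-- ===== LEMMAS AND PROOFS =====

/-- The list `[c+x1, c+x1+x2, …]` of partial sums continuing from `c`. -/
def pvSums (c : Int) : List Int → List Int
  | [] => []
  | p :: xs => (c + p) :: pvSums (c + p) xs

/-- Reference recursion both loops are reduced to: running max of deficits `s - S`. -/
def pvRef : List Int → Int → Int → Int → Int
  | [], _, _, f => f
  | p :: xs, s, S, f => pvRef xs (s + 1) (S + p) (if 0 < p ∧ f < s - S then s - S else f)

theorem buildPrefix_eq (xs : List Int) : ∀ (pr : List Int) (c : Int),
    buildPrefix (pr ++ [c]) xs = pr ++ c :: pvSums c xs := by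
  induction xs with
  | nil => intro pr c; simp [buildPrefix, pvSums]
  | cons p xs ih =>
    intro pr c
    show buildPrefix ((pr ++ [c]) ++ [(pr ++ [c]).getLastD 0 + p]) xs = _
    rw [List.getLastD_concat, ih (pr ++ [c]) (c + p)]
    simp [pvSums]

theorem sums_getD (xs : List Int) : ∀ (c : Int) (k : Nat), k ≤ xs.length →
    (c :: pvSums c xs).getD k 0 = c + (xs.take k).sum := by
  induction xs with
  | nil =>
    intro c k hk
    have : k = 0 := Nat.le_zero.mp hk
    subst this; simp
  | cons p xs ih =>
    intro c k hk
    cases k with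
    | zero => simp
    | succ k =>
      have := ih (c + p) k (by simpa using hk)
      simp only [pvSums, List.getD, List.take, List.sum_cons] at *
      simp only [List.getElem?_cons_succ]
      simpa [add_assoc] using this

theorem pref_getD (xs : List Int) (k : Nat) (hk : k ≤ xs.length) :
    PySem.List.pyGetD (buildPrefix [0] xs) (k : Int) 0 = (xs.take k).sum := by
  have h := buildPrefix_eq xs [] 0
  simp only [List.nil_append] at h
  rw [h, PySem.List.pyGetD_natCast]
  simpa using sums_getD xs 0 k hk

theorem lemA (xs : List Int) : ∀ (s S f : Int), 0 ≤ f →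
    ((PySem.List.enumerate xs s).foldl
      (fun (st : Int × Int) ip =>
        let m : Int := if ip.2 > 0 then max (ip.1 - st.1) 0 else 0
        (st.1 + ip.2 + m, st.2 + m))
      (S + f, f)).2 = pvRef xs s S f := by
  induction xs with
  | nil => intro s S f hf; simp [PySem.List.enumerate_nil, pvRef]
  | cons p xs ih =>
    intro s S f hf
    rw [PySem.List.enumerate_cons, List.foldl_cons, pvRef]
    by_cases hp : (0:Int) < p
    · by_cases hb : f < s - S
      · have hm : (if p > 0 then max (s - (S + f)) 0 else 0) = s - S - f := by
          rw [if_pos hp]; omega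
        simp only [hm]
        have h1 : S + f + p + (s - S - f) = (S + p) + (s - S) := by ring
        have h2 : f + (s - S - f) = s - S := by ring
        rw [h1, h2, ih (s + 1) (S + p) (s - S) (by omega), if_pos ⟨hp, hb⟩]
      · have hm : (if p > 0 then max (s - (S + f)) 0 else 0) = 0 := by
          rw [if_pos hp]; omega
        simp only [hm, add_zero]
        have h1 : S + f + p = (S + p) + f := by ring
        rw [h1, ih (s + 1) (S + p) f hf, if_neg (by tauto)]
    · have hm : (if p > 0 then max (s - (S + f)) 0 else 0) = 0 := by
        rw [if_neg hp]
      simp only [hm, add_zero]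
      have h1 : S + f + p = (S + p) + f := by ring
      rw [h1, ih (s + 1) (S + p) f hf, if_neg (by tauto)]

theorem lemB (P : List Int) (xs : List Int) : ∀ (s S f : Int),
    (∀ k : Nat, k < xs.length → PySem.List.pyGetD P (s + (k : Int)) 0 = S + (xs.take k).sum) →
    (PySem.List.enumerate xs s).foldl
      (fun best ip =>
        if ip.2 > 0 ∧ ip.1 - PySem.List.pyGetD P ip.1 0 > best
        then ip.1 - PySem.List.pyGetD P ip.1 0 else best)
      f = pvRef xs s S f := by
  induction xs with
  | nil => intro s S f _; simp [PySem.List.enumerate_nil, pvRef]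
  | cons p xs ih =>
    intro s S f h
    rw [PySem.List.enumerate_cons, List.foldl_cons, pvRef]
    have h0 : PySem.List.pyGetD P s 0 = S := by
      have := h 0 (by simp)
      simpa using this
    have hstep : ∀ k : Nat, k < xs.length →
        PySem.List.pyGetD P ((s + 1) + (k : Int)) 0 = (S + p) + (xs.take k).sum := by
      intro k hk
      have := h (k + 1) (by simpa using Nat.succ_lt_succ hk)
      push_cast at this ⊢
      rw [show s + 1 + (k : Int) = s + ((k : Int) + 1) by ring, this]
      simp [add_assoc]
    rw [ih (s + 1) (S + p) _ hstep, h0]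

theorem ports_eq (persons : List Int) : min_friends persons = min_friends_alt persons := by
  unfold min_friends min_friends_alt
  rw [show ((0:Int), (0:Int)) = ((0:Int) + 0, (0:Int)) by simp]
  rw [lemA persons 0 0 0 le_rfl]
  have hlook : ∀ k : Nat, k < persons.length →
      PySem.List.pyGetD (buildPrefix [0] persons) ((0:Int) + (k : Int)) 0 = 0 + (persons.take k).sum := by
    intro k hk
    rw [zero_add, zero_add]
    exact pref_getD persons k hk.le
  rw [lemB (buildPrefix [0] persons) persons 0 0 0 hlook]

-- ===== VERDICT (by name: the statement is the Claim_ definition above) =====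
theorem min_friends_spec : Claim_equal_min_friends := by
  intro persons _
  unfold Spec_min_friends
  exact ports_eq persons
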